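-- pv_equiv track=rewrite | github.com/AlbertLiangca/IntrotoProgramming | Python Edition/SunsetSol.py | AlbertSunsetSol
-- ===== SOURCE A (Python) =====
-- def AlbertSunsetSol(street):
--     sunsetbdings = []
--     for building in street:
--         sunsetbdings.append([])
--         sunsetbdings[-1].append(building)
--         for view in sunsetbdings[:-1]:
--             if building > view[0]:
--                 sunsetbdings.remove(view)
--     return len(sunsetbdings)
-- ===== SOURCE B (Python) =====
-- def AlbertSunsetSol(street):
--     count = 0
--     mx = None
--     for b in reversed(street):
--         if mx is None or b >= mx:
--             count += 1
--         if mx is None or b > mx: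
--             mx = b
--     return count
-- ===== Notes on version B (the rewrite author's own statement) =====
-- stated objective: faster
-- what changed: Replaced the quadratic build-a-list-of-candidates-and-remove scheme with a single backward pass that tracks the running maximum and counts buildings at least as tall as everything behind them.
import Mathlib
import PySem

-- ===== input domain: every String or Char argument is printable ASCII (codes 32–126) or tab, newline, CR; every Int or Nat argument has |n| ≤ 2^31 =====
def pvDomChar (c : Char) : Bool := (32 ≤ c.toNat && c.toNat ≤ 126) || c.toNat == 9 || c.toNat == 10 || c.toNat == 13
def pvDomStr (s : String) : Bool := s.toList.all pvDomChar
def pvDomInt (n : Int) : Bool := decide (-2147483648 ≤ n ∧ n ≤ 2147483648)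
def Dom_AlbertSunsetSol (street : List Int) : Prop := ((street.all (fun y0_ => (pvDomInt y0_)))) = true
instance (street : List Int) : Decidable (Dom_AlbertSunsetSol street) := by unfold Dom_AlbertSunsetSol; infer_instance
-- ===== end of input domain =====

-- B replaces A's quadratic candidate-list-with-removals scheme by one backward pass
-- tracking the running maximum (objective: faster, asymptotic O(n^2) -> O(n)).

-- ===== PORT A =====
-- inner loop: 'for view in sunsetbdings[:-1]: if building > view[0]: sunsetbdings.remove(view)'
-- (view[0] is modelled by (pyGet? view 0).getD 0 and a failed remove by .getD acc; views are
-- always nonempty singletons and the removed value is always present, so both defaults are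
-- never taken on any reachable state — this is exact).
def pvRemoveViews (building : Int) (views : List (List Int)) (s : List (List Int)) :
    List (List Int) :=
  views.foldl (fun acc view =>
    if building > (PySem.List.pyGet? view 0).getD 0 then
      (PySem.List.remove? acc view).getD acc
    else acc) s

def AlbertSunsetSol (street : List Int) : Int :=
  let sunsetbdings := street.foldl (fun s building =>
    -- sunsetbdings.append([]); sunsetbdings[-1].append(building)
    let s := s ++ [[building]]
    -- sunsetbdings[:-1] is dropLast (exact for the slice [:-1])
    pvRemoveViews building s.dropLast s) []
  (sunsetbdings.length : Int)

-- ===== PORT B =====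
def AlbertSunsetSol_alt (street : List Int) : Int :=
  (street.reverse.foldl (fun (acc : Int × Option Int) b =>
      let count : Int :=
        match acc.2 with
        | none => acc.1 + 1
        | some m => if b ≥ m then acc.1 + 1 else acc.1
      let mx : Option Int :=
        match acc.2 with
        | none => some b
        | some m => if b > m then some b else acc.2
      (count, mx)) ((0 : Int), (none : Option Int))).1

-- ===== PRECONDITION & SPEC =====
def Spec_AlbertSunsetSol (street : List Int) (out : Int) : Prop := out = AlbertSunsetSol_alt street
instance (street : List Int) (out : Int) : Decidable (Spec_AlbertSunsetSol street out) := by unfold Spec_AlbertSunsetSol; infer_instance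

-- ===== CLAIM (what is proved, stated in full; the proofs are below) =====
def Claim_equal_AlbertSunsetSol : Prop := ∀ (street : List Int), Dom_AlbertSunsetSol street → Spec_AlbertSunsetSol street (AlbertSunsetSol street)

-- ===== LEMMAS AND PROOFS =====

-- survivors of a street: buildings ≥ every later building (in order)
def pvSurv : List Int → List Int
  | [] => []
  | x :: xs => if xs.all (fun y => y ≤ x) then x :: pvSurv xs else pvSurv xs

-- running maximum (as Python's implicit max from the right)
def pvMax : List Int → Option Int
  | [] => none
  | x :: xs => some (match pvMax xs with | none => x | some m => if x > m then x else m)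

theorem pvMax_charact (x : Int) (xs : List Int) :
    (xs.all (fun y => y ≤ x)) = (match pvMax xs with | none => true | some m => decide (m ≤ x)) := by
  induction xs with
  | nil => simp [pvMax]
  | cons a t ih =>
    simp only [List.all_cons, pvMax, ih]
    cases h : pvMax t with
    | none => simp
    | some m =>
      by_cases hc : a > m <;> simp [hc] <;> omega

-- B computes (|pvSurv l|, pvMax l)
theorem alt_foldr (l : List Int) :
    l.foldr (fun b (acc : Int × Option Int) =>
      ((match acc.2 with
        | none => acc.1 + 1
        | some m => if b ≥ m then acc.1 + 1 else acc.1),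
       (match acc.2 with
        | none => some b
        | some m => if b > m then some b else acc.2))) ((0 : Int), (none : Option Int))
    = (((pvSurv l).length : Int), pvMax l) := by
  induction l with
  | nil => simp [pvSurv, pvMax]
  | cons x xs ih =>
    simp only [List.foldr_cons, ih, pvSurv, pvMax, pvMax_charact]
    cases h : pvMax xs with
    | none => simp
    | some m =>
      by_cases h1 : x ≥ m
      · have h2 : (decide (m ≤ x)) = true := by simpa using h1
        by_cases h3 : x > m <;> simp [h1, h3]
      · have h2 : (decide (m ≤ x)) = false := by simpa using h1
        have h3 : ¬ x > m := by omega
        simp [h1, h3]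

theorem alt_eq_surv (l : List Int) :
    AlbertSunsetSol_alt l = ((pvSurv l).length : Int) := by
  unfold AlbertSunsetSol_alt
  rw [List.foldl_reverse]
  have := alt_foldr l
  simp only [ge_iff_le] at this ⊢
  rw [this]

-- pvSurv under snoc: every old survivor survives iff it is ≥ the new building
theorem surv_snoc (p : List Int) (b : Int) :
    pvSurv (p ++ [b]) = (pvSurv p).filter (fun v => b ≤ v) ++ [b] := by
  induction p with
  | nil => simp [pvSurv]
  | cons x t ih =>
    simp only [List.cons_append, pvSurv, List.all_append, List.all_cons, List.all_nil,
      Bool.and_true, ih]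
    by_cases h1 : (t.all (fun y => y ≤ x)) = true
    · by_cases h2 : b ≤ x
      · simp [h1, h2]
      · have : (decide (b ≤ x)) = false := by simpa using h2
        simp [h1, this]
    · have h1' : (t.all (fun y => y ≤ x)) = false := by simpa using h1
      by_cases h2 : b ≤ x <;> simp [h1']

-- remove? drops the first occurrence; pulled through a prefix not containing the value
theorem remove?_append_cons {α : Type} [BEq α] [LawfulBEq α] (u t : List α) (a : α) (hu : a ∉ u) :
    PySem.List.remove? (u ++ a :: t) a = some (u ++ t) := by
  induction u with
  | nil => simp
  | cons y u' ih =>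
    have hy : y ≠ a := by intro h; exact hu (by simp [h])
    have hu' : a ∉ u' := fun h => hu (by simp [h])
    rw [List.cons_append, PySem.List.remove?_cons_of_ne _ hy, ih hu']
    simp

-- the inner removal loop on a state of singleton survivor lists
theorem removeViews_singletons (b : Int) (q r : List Int)
    (hr : ∀ x ∈ r, b ≤ x) :
    pvRemoveViews b (q.map (fun x => [x]))
      ((r.map (fun x => [x])) ++ (q.map (fun x => [x])) ++ [[b]])
    = ((r ++ q.filter (fun v => b ≤ v)).map (fun x => [x])) ++ [[b]] := by
  induction q generalizing r with
  | nil => simp [pvRemoveViews]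
  | cons x q' ih =>
    simp only [pvRemoveViews] at ih
    simp only [List.map_cons, pvRemoveViews, List.foldl_cons]
    by_cases hbx : b > x
    · have hget : (PySem.List.pyGet? [x] 0).getD 0 = x := by
        simp [PySem.List.pyGet?, PySem.List.pyIdx?]
      have hnotin : [x] ∉ r.map (fun y => [y]) := by
        simp only [List.mem_map]
        rintro ⟨y, hy, hxy⟩
        have : y = x := by simpa using hxy
        have := hr y hy
        omega
      have hrem : PySem.List.remove?
          ((r.map (fun y => [y])) ++ [x] :: ((q'.map (fun y => [y])) ++ [[b]])) [x]
          = some ((r.map (fun y => [y])) ++ ((q'.map (fun y => [y])) ++ [[b]])) :=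
        remove?_append_cons _ _ _ hnotin
      have harr : (r.map (fun y : Int => [y])) ++ [x] :: (q'.map (fun y => [y])) ++ [[b]]
          = (r.map (fun y : Int => [y])) ++ [x] :: ((q'.map (fun y => [y])) ++ [[b]]) := by
        simp
      rw [hget, if_pos hbx, harr, hrem]
      simp only [Option.getD_some]
      have : (r.map (fun y : Int => [y])) ++ ((q'.map (fun y => [y])) ++ [[b]])
          = (r.map (fun y : Int => [y])) ++ (q'.map (fun y => [y])) ++ [[b]] := by simp
      rw [this, ih r hr]
      have hfx : (decide (b ≤ x)) = false := by simp; omega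
      simp [hfx]
    · have hget : (PySem.List.pyGet? [x] 0).getD 0 = x := by
        simp [PySem.List.pyGet?, PySem.List.pyIdx?]
      rw [hget, if_neg hbx]
      have hr' : ∀ y ∈ r ++ [x], b ≤ y := by
        intro y hy
        rcases List.mem_append.mp hy with h | h
        · exact hr y h
        · simp at h; omega
      have harr : (r.map (fun y : Int => [y])) ++ [x] :: (q'.map (fun y => [y])) ++ [[b]]
          = ((r ++ [x]).map (fun y : Int => [y])) ++ (q'.map (fun y => [y])) ++ [[b]] := by
        simp
      rw [harr, ih (r ++ [x]) hr']
      have hfx : (decide (b ≤ x)) = true := by simp; omega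
      simp [hfx]

-- A's outer loop maintains: state = survivors of the processed prefix, as singleton lists
theorem foldA_inv (l p : List Int) :
    l.foldl (fun s building =>
        let s := s ++ [[building]]
        pvRemoveViews building s.dropLast s) ((pvSurv p).map (fun x => [x]))
    = (pvSurv (p ++ l)).map (fun x => [x]) := by
  induction l generalizing p with
  | nil => simp
  | cons b l' ih =>
    simp only [List.foldl_cons]
    have hstep : (let s := ((pvSurv p).map (fun x => [x])) ++ [[b]]
        pvRemoveViews b s.dropLast s)
        = (pvSurv (p ++ [b])).map (fun x => [x]) := by
      simp only []
      have hdl : (((pvSurv p).map (fun x : Int => [x])) ++ [[b]]).dropLast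
          = (pvSurv p).map (fun x => [x]) := by
        simp
      rw [hdl]
      have := removeViews_singletons b (pvSurv p) [] (by simp)
      simp only [List.map_nil, List.nil_append] at this
      rw [this, surv_snoc]
      simp
    rw [hstep, ih (p ++ [b])]
    simp

theorem a_eq_surv (l : List Int) :
    AlbertSunsetSol l = ((pvSurv l).length : Int) := by
  unfold AlbertSunsetSol
  have := foldA_inv l []
  simp only [pvSurv, List.map_nil, List.nil_append] at this
  rw [this]
  simp

-- ===== VERDICT (by name: the statement is the Claim_ definition above) =====
theorem AlbertSunsetSol_spec : Claim_equal_AlbertSunsetSol := by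
  intro street _
  unfold Spec_AlbertSunsetSol
  rw [a_eq_surv, alt_eq_surv]
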